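-- pv_equiv track=rewrite | github.com/taylorparsons/athena-skill | skills/athena/scripts/owl.py | _extract_status_from_tasks
-- ===== SOURCE A (Python) =====
-- def _extract_status_from_tasks(tasks_content: str) -> str:
--     """Active if any real task exists under NEXT or IN PROGRESS sections"""
--     in_active_section = False
--     for line in tasks_content.split('\n'):
--         if line.startswith('## NEXT') or line.startswith('## IN PROGRESS'):
--             in_active_section = True
--         elif line.startswith('## '):
--             in_active_section = False
--         elif in_active_section and line.strip().startswith('- '):
--             task_text = line.strip()[2:].strip()
--             if task_text and task_text.lower() not in ('(none)', 'none', ''):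
--                 return 'Active'
--     return 'Done'
-- ===== SOURCE B (Python) =====
-- def _extract_status_from_tasks(tasks_content: str) -> str:
--     """Active if any real task exists under NEXT or IN PROGRESS sections"""
--     for is_active, body in _split_sections(tasks_content.split('\n')):
--         if is_active and any(_is_real_task(l) for l in body):
--             return 'Active'
--     return 'Done'
--
--
-- def _split_sections(lines):
--     """Group lines into (is_active_header, body_lines) sections; lines before the first header are dropped."""
--     sections = []
--     k = 0
--     while k < len(lines):
--         line = lines[k]
--         if line.startswith('## '):
--             body = []
--             k += 1
--             while k < len(lines) and not lines[k].startswith('## '):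
--                 body.append(lines[k])
--                 k += 1
--             sections.append((line.startswith('## NEXT') or line.startswith('## IN PROGRESS'), body))
--         else:
--             k += 1
--     return sections
--
--
-- def _is_real_task(line):
--     t = line.strip()
--     if t.startswith('- '):
--         task = t[2:].strip()
--         return bool(task) and task.lower() not in ('(none)', 'none', '')
--     return False
-- ===== Notes on version B (the rewrite author's own statement) =====
-- stated objective: alternative
-- what changed: Replaced A's single interleaved flag-carrying scan with an early return by a two-pass decomposition: one pass groups the lines into (active?, body) sections, a second pass scans the collected sections for a real task.
import Mathlib
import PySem

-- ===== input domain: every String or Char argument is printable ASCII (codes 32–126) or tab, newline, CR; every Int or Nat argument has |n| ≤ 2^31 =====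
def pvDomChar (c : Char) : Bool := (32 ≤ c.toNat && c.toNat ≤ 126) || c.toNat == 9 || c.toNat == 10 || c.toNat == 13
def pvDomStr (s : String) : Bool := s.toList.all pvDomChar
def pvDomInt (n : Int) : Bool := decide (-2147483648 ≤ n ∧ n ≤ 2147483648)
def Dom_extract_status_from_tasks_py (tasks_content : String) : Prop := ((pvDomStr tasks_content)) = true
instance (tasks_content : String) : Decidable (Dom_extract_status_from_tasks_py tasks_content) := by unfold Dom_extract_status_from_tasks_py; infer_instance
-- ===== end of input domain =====

-- B replaces A's single interleaved flag-carrying scan by a two-pass decomposition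
-- (group lines into sections, then scan the sections); same cost, alternative shape.

-- ===== PORT A =====
-- A's single scan over the lines, carrying the in_active_section flag, early return on a real task.
def pyA_loop : List (List Char) → Bool → String
  | [], _ => "Done"
  | line :: rest, act =>
    if PySem.Chars.startswith line "## NEXT".toList || PySem.Chars.startswith line "## IN PROGRESS".toList then
      pyA_loop rest true
    else if PySem.Chars.startswith line "## ".toList then
      pyA_loop rest false
    else if act && PySem.Chars.startswith (PySem.Chars.strip line) "- ".toList then
      let task := PySem.Chars.strip (PySem.Chars.slice (PySem.Chars.strip line) (some 2) none)
      if !(task == []) && !(PySem.Chars.lower task == "(none)".toList || PySem.Chars.lower task == "none".toList || PySem.Chars.lower task == [])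
      then "Active"
      else pyA_loop rest act
    else pyA_loop rest act

def extract_status_from_tasks_py (tasks_content : String) : String :=
  pyA_loop (PySem.Chars.splitOn tasks_content.toList "\n".toList) false

-- ===== PORT B =====
def pvIsHeader (l : List Char) : Bool := PySem.Chars.startswith l "## ".toList

def pvIsActiveHeader (l : List Char) : Bool :=
  PySem.Chars.startswith l "## NEXT".toList || PySem.Chars.startswith l "## IN PROGRESS".toList

def pvIsRealTask (l : List Char) : Bool :=
  let t := PySem.Chars.strip l
  if PySem.Chars.startswith t "- ".toList then
    let task := PySem.Chars.strip (PySem.Chars.slice t (some 2) none)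
    !(task == []) && !(PySem.Chars.lower task == "(none)".toList || PySem.Chars.lower task == "none".toList || PySem.Chars.lower task == [])
  else false

-- first pass of B: group lines into (is_active_header, body) sections, dropping any preamble
def pvSplitSections : List (List Char) → List (Bool × List (List Char))
  | [] => []
  | l :: rest =>
    if pvIsHeader l then
      (pvIsActiveHeader l, rest.takeWhile (fun x => !pvIsHeader x)) ::
        pvSplitSections (rest.dropWhile (fun x => !pvIsHeader x))
    else pvSplitSections rest
  termination_by ls => ls.length
  decreasing_by
  · exact Nat.lt_succ_of_le (List.length_dropWhile_le _ _)
  · exact Nat.lt_succ_of_le (Nat.le_refl _)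

-- second pass of B: scan the collected sections
def pvScanSections : List (Bool × List (List Char)) → String
  | [] => "Done"
  | (a, body) :: rest =>
    if a && body.any pvIsRealTask then "Active" else pvScanSections rest

def extract_status_from_tasks_py_alt (tasks_content : String) : String :=
  pvScanSections (pvSplitSections (PySem.Chars.splitOn tasks_content.toList "\n".toList))

-- ===== PRECONDITION & SPEC =====
def Spec_extract_status_from_tasks_py (tasks_content : String) (out : String) : Prop := out = extract_status_from_tasks_py_alt tasks_content
instance (tasks_content : String) (out : String) : Decidable (Spec_extract_status_from_tasks_py tasks_content out) := by unfold Spec_extract_status_from_tasks_py; infer_instance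

-- ===== CLAIM (what is proved, stated in full; the proofs are below) =====
def Claim_equal_extract_status_from_tasks_py : Prop := ∀ (tasks_content : String), Dom_extract_status_from_tasks_py tasks_content → Spec_extract_status_from_tasks_py tasks_content (extract_status_from_tasks_py tasks_content)

-- ===== LEMMAS AND PROOFS =====

-- an "active" header ('## NEXT' / '## IN PROGRESS') is in particular a header ('## ')
lemma pvActive_isHeader (l : List Char) (h : pvIsActiveHeader l = true) : pvIsHeader l = true := by
  unfold pvIsActiveHeader at h
  unfold pvIsHeader
  simp only [PySem.Chars.startswith_iff, Bool.or_eq_true] at h ⊢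
  rcases h with h | h
  · exact List.IsPrefix.trans (by decide) h
  · exact List.IsPrefix.trans (by decide) h

-- skipping a non-header line does not change the sections
lemma pvSplit_skip (l : List Char) (rest : List (List Char)) (h : pvIsHeader l = false) :
    pvSplitSections (l :: rest) = pvSplitSections rest := by
  rw [pvSplitSections]
  simp [h]

-- characterisation of A's loop: the flag-dependent remainder of the current section,
-- then B's section scan of the remaining lines
lemma pvLoop_char (lines : List (List Char)) (act : Bool) :
    pyA_loop lines act =
      if act && (lines.takeWhile (fun x => !pvIsHeader x)).any pvIsRealTask then "Active"
      else pvScanSections (pvSplitSections (lines.dropWhile (fun x => !pvIsHeader x))) := by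
  match lines with
  | [] => simp [pyA_loop, pvSplitSections, pvScanSections]
  | l :: rest =>
    by_cases hh : pvIsHeader l = true
    · have htd : List.takeWhile (fun x => !pvIsHeader x) (l :: rest) = [] ∧
          List.dropWhile (fun x => !pvIsHeader x) (l :: rest) = l :: rest := by
        constructor <;> simp [List.takeWhile, List.dropWhile, hh]
      rw [htd.1, htd.2]
      have hstep : pyA_loop (l :: rest) act = pyA_loop rest (pvIsActiveHeader l) := by
        by_cases ha : pvIsActiveHeader l = true
        · rw [pyA_loop, if_pos (by exact ha), ha]
        · rw [pyA_loop, if_neg (by simp [pvIsActiveHeader] at ha ⊢; exact ha),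
            if_pos (by exact hh)]
          simp only [Bool.not_eq_true] at ha
          rw [ha]
      rw [hstep, pvLoop_char rest (pvIsActiveHeader l)]
      conv_rhs => rw [pvSplitSections, if_pos hh, pvScanSections]
      simp
    · simp only [Bool.not_eq_true] at hh
      have htake : List.takeWhile (fun x => !pvIsHeader x) (l :: rest) =
          l :: List.takeWhile (fun x => !pvIsHeader x) rest := by
        simp [List.takeWhile, hh]
      have hdrop : List.dropWhile (fun x => !pvIsHeader x) (l :: rest) =
          List.dropWhile (fun x => !pvIsHeader x) rest := by
        simp [List.dropWhile, hh]
      rw [htake, hdrop]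
      have hna : pvIsActiveHeader l = false := by
        by_contra hc
        simp only [Bool.not_eq_false] at hc
        rw [pvActive_isHeader l hc] at hh
        cases hh
      rw [pyA_loop, if_neg (by rw [show ((PySem.Chars.startswith l "## NEXT".toList ||
            PySem.Chars.startswith l "## IN PROGRESS".toList)) = pvIsActiveHeader l from rfl, hna]; simp),
          if_neg (by rw [show PySem.Chars.startswith l "## ".toList = pvIsHeader l from rfl, hh]; simp)]
      by_cases hs : PySem.Chars.startswith (PySem.Chars.strip l) "- ".toList = true
      · by_cases hg : (!(PySem.Chars.strip (PySem.Chars.slice (PySem.Chars.strip l) (some 2) none) == []) &&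
            !(PySem.Chars.lower (PySem.Chars.strip (PySem.Chars.slice (PySem.Chars.strip l) (some 2) none)) == "(none)".toList ||
              PySem.Chars.lower (PySem.Chars.strip (PySem.Chars.slice (PySem.Chars.strip l) (some 2) none)) == "none".toList ||
              PySem.Chars.lower (PySem.Chars.strip (PySem.Chars.slice (PySem.Chars.strip l) (some 2) none)) == [])) = true
        · -- a real task line: pvIsRealTask l = true
          have hr : pvIsRealTask l = true := by
            unfold pvIsRealTask
            rw [if_pos hs]
            exact hg
          cases act with
          | false =>
            rw [pvLoop_char rest false]
            simp
          | true =>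
            rw [if_pos (by rw [hs]; simp), if_pos hg,
              if_pos (by simp [List.any_cons, hr])]
        · have hr : pvIsRealTask l = false := by
            unfold pvIsRealTask
            rw [if_pos hs]
            simpa using hg
          simp only [Bool.not_eq_true] at hg
          by_cases h2 : (act && PySem.Chars.startswith (PySem.Chars.strip l) "- ".toList) = true
          · rw [if_pos h2, if_neg (by rw [hg]; simp), pvLoop_char rest act]
            simp [List.any_cons, hr]
          · rw [if_neg h2, pvLoop_char rest act]
            simp [List.any_cons, hr]
      · simp only [Bool.not_eq_true] at hs
        have hs' : PySem.Chars.startswith (PySem.Chars.strip l) ['-', ' '] = false := by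
          simpa using hs
        have hr : pvIsRealTask l = false := by
          unfold pvIsRealTask
          simp [hs']
        rw [if_neg (by rw [hs]; simp), pvLoop_char rest act]
        simp [List.any_cons, hr]
  termination_by lines.length
  decreasing_by all_goals simp

-- ===== VERDICT (by name: the statement is the Claim_ definition above) =====
theorem extract_status_from_tasks_py_spec : Claim_equal_extract_status_from_tasks_py := by
  intro s _
  unfold Spec_extract_status_from_tasks_py extract_status_from_tasks_py extract_status_from_tasks_py_alt
  rw [pvLoop_char]
  simp only [Bool.false_and, if_neg (by simp : ¬ (false = true))]
  generalize PySem.Chars.splitOn s.toList "\n".toList = lines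
  induction lines with
  | nil => simp
  | cons l rest ih =>
    by_cases hh : pvIsHeader l = true
    · simp [List.dropWhile, hh]
    · simp only [Bool.not_eq_true] at hh
      rw [List.dropWhile_cons_of_pos (by simp [hh]), pvSplit_skip l rest hh]
      simpa [List.dropWhile] using ih
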